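-- pv_equiv track=rewrite | github.com/dawnandrew100/Advent_of_Code | 2015/Day 11/Python/main.py | double_double
-- ===== SOURCE A (Python) =====
-- def double_double(input: str) -> bool:
--   prev_letter = ""
--   double_count = 0
--   for letter in input:
--     if letter == prev_letter:
--       double_count += 1
--       prev_letter = ""
--       if double_count == 2:
--         return True
--       continue
--     prev_letter = letter
--   return False
-- ===== SOURCE B (Python) =====
-- def double_double(input: str) -> bool:
--     pairs = [a == b for a, b in zip(input, input[1:])]
--     try:
--         i = pairs.index(True)
--     except ValueError:
--         return False
--     return True in pairs[i + 2:]
-- ===== Notes on version B (the rewrite author's own statement) =====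
-- stated objective: idiomatic
-- what changed: Replaces A's single-pass state machine (prev-letter sentinel + double counter with early return) by a two-phase search: build the list of adjacent-pair equalities once, find the first double with list.index, and check for another double at least two positions later.
import Mathlib
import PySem

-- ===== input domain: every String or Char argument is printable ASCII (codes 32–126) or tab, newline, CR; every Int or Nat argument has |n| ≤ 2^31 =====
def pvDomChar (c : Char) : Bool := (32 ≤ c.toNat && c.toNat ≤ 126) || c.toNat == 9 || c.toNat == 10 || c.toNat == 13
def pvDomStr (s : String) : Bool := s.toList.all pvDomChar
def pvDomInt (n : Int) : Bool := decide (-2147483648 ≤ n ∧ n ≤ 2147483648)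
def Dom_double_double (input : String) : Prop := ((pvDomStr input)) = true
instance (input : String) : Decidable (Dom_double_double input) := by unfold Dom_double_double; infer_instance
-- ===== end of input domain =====

-- B replaces A's one-pass state machine (prev letter + counter) by an idiomatic two-phase
-- search: build the adjacent-pair equality list, find the first double, look for another
-- double at least two positions later (objective: idiomatic; same O(n) cost).

-- ===== PORT A =====
-- A's loop: state = (prev_letter : Option Char for "", double_count); early return True.
def ddLoopA : Option Char → Nat → List Char → Bool
  | _, _, [] => false
  | prev, count, c :: rest =>
    if some c = prev then
      if count + 1 = 2 then true
      else ddLoopA none (count + 1) rest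
    else ddLoopA (some c) count rest

def double_double (input : String) : Bool := ddLoopA none 0 input.toList


-- ===== PORT B =====
-- pairs = [a == b for a, b in zip(input, input[1:])]
def ddPairs (l : List Char) : List Bool :=
  (l.zip l.tail).map (fun p => p.1 == p.2)

-- try: i = pairs.index(True) / except: return False / return True in pairs[i+2:]
def ddBody (pairs : List Bool) : Bool :=
  match PySem.List.index? pairs true with
  | none => false
  | some i => (PySem.List.slice pairs (some ((i : Int) + 2)) none).contains true

def double_double_alt (input : String) : Bool :=
  ddBody (ddPairs input.toList)

-- ===== PRECONDITION & SPEC =====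
def Spec_double_double (input : String) (out : Bool) : Prop := out = double_double_alt input
instance (input : String) (out : Bool) : Decidable (Spec_double_double input out) := by unfold Spec_double_double; infer_instance

-- ===== CLAIM (what is proved, stated in full; the proofs are below) =====
def Claim_equal_double_double : Prop := ∀ (input : String), Dom_double_double input → Spec_double_double input (double_double input)

-- ===== LEMMAS AND PROOFS =====

-- reference recursive forms
def hasAdj : List Char → Bool
  | a :: b :: t => a == b || hasAdj (b :: t)
  | _ => false

def phase1 : List Char → Bool
  | a :: b :: t => if a == b then hasAdj t else phase1 (b :: t)
  | _ => false

theorem ddLoopA_one (l : List Char) (c : Char) :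
    ddLoopA (some c) 1 l = hasAdj (c :: l) := by
  induction l generalizing c with
  | nil => simp [ddLoopA, hasAdj]
  | cons d r ih =>
    by_cases h : d = c
    · subst h; simp [ddLoopA, hasAdj]
    · have h' : ¬ (c = d) := fun hh => h hh.symm
      simp [ddLoopA, hasAdj, h, h', ih]

theorem ddLoopA_one_none (l : List Char) : ddLoopA none 1 l = hasAdj l := by
  cases l with
  | nil => rfl
  | cons c r => simpa [ddLoopA] using ddLoopA_one r c

theorem ddLoopA_zero (l : List Char) (c : Char) :
    ddLoopA (some c) 0 l = phase1 (c :: l) := by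
  induction l generalizing c with
  | nil => simp [ddLoopA, phase1]
  | cons d r ih =>
    by_cases h : c = d
    · subst h; simp [ddLoopA, phase1, ddLoopA_one_none]
    · have h' : ¬ (d = c) := fun hh => h hh.symm
      simp [ddLoopA, phase1, h, h', ih]

theorem a_eq_phase1 (l : List Char) : ddLoopA none 0 l = phase1 l := by
  cases l with
  | nil => rfl
  | cons c r => simpa [ddLoopA] using ddLoopA_zero r c

-- B side
theorem ddPairs_cons (a b : Char) (t : List Char) :
    ddPairs (a :: b :: t) = (a == b) :: ddPairs (b :: t) := by
  simp [ddPairs]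

theorem ddPairs_tail (b : Char) (t : List Char) :
    (ddPairs (b :: t)).tail = ddPairs t := by
  cases t with
  | nil => rfl
  | cons c u => simp [ddPairs]

theorem contains_ddPairs (l : List Char) : (ddPairs l).contains true = hasAdj l := by
  induction l with
  | nil => rfl
  | cons a t ih =>
    cases t with
    | nil => rfl
    | cons b u =>
      rw [ddPairs_cons, List.contains_cons, ih]
      cases hab : (a == b) <;> simp [hasAdj, hab]

theorem ddBody_none (pairs : List Bool) (h : PySem.List.index? pairs true = none) :
    ddBody pairs = false := by
  unfold ddBody; rw [h]

theorem ddBody_some (pairs : List Bool) (k : Nat)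
    (h : PySem.List.index? pairs true = some k) :
    ddBody pairs = (PySem.List.slice pairs (some ((k : Int) + 2)) none).contains true := by
  unfold ddBody; rw [h]

-- the core: B's body equals phase1, by induction over the char list
theorem b_eq_phase1 (l : List Char) : ddBody (ddPairs l) = phase1 l := by
  induction l with
  | nil => rfl
  | cons a t ih =>
    cases t with
    | nil => rfl
    | cons b u =>
      rw [ddPairs_cons]
      by_cases h : a = b
      · have hb : (a == b) = true := by simp [h]
        rw [hb, ddBody_some _ 0 (PySem.List.index?_cons_self true _)]
        have h2 : ((0 : Nat) : Int) + 2 = ((2 : Nat) : Int) := by norm_num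
        rw [h2, PySem.List.slice_from_natCast]
        have hd : List.drop 2 (true :: ddPairs (b :: u)) = ddPairs u := by
          rw [List.drop_succ_cons, List.drop_one, ddPairs_tail]
        rw [hd, contains_ddPairs]
        simp [phase1, h]
      · have hne : (a == b) ≠ true := by simp [h]
        have hph : phase1 (a :: b :: u) = phase1 (b :: u) := by simp [phase1, h]
        cases hi : PySem.List.index? (ddPairs (b :: u)) true with
        | none =>
          have hn : PySem.List.index? ((a == b) :: ddPairs (b :: u)) true = none := by
            rw [PySem.List.index?_cons_of_ne _ hne, hi]; rfl
          rw [ddBody_none _ hn, hph, ← ih, ddBody_none _ hi]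
        | some i =>
          have hs : PySem.List.index? ((a == b) :: ddPairs (b :: u)) true = some (i + 1) := by
            rw [PySem.List.index?_cons_of_ne _ hne, hi]; rfl
          rw [ddBody_some _ _ hs]
          have hc : ((i + 1 : Nat) : Int) + 2 = (((i + 3) : Nat) : Int) := by push_cast; ring
          rw [hc, PySem.List.slice_from_natCast,
            show i + 3 = (i + 2) + 1 from rfl, List.drop_succ_cons]
          rw [hph, ← ih, ddBody_some _ _ hi,
            show ((i : Nat) : Int) + 2 = (((i + 2) : Nat) : Int) from by push_cast; ring,
            PySem.List.slice_from_natCast]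

theorem alt_eq_phase1 (s : String) : double_double_alt s = phase1 s.toList := by
  unfold double_double_alt
  exact b_eq_phase1 s.toList

-- ===== VERDICT (by name: the statement is the Claim_ definition above) =====
theorem double_double_spec : Claim_equal_double_double := by
  intro input _
  unfold Spec_double_double double_double
  rw [a_eq_phase1, alt_eq_phase1]
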